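-- pv_equiv track=rewrite | github.com/981377660LMT/algorithm-study | 19_数学/floorRange.py | floorRange
-- ===== SOURCE A (Python) =====
-- from typing import List, Tuple
--
-- def floorRange(n: int) -> List[Tuple[int, int, int]]:
--     """
--     将 [1,n] 内的数分成O(2*sqrt(n))段, 每段内的 n//i 相同
--
--     Args:
--         n (int): n>=1
--
--     Returns:
--         List[Tuple[int,int,int]]:
--         每个元素为(left,right,div)
--         表示 left <= i <= right 内的 n//i == div
--     """
--     if n <= 0:
--         return []
--     res = []
--     m = 1
--     while m * m <= n:
--         res.append((m, m, n // m))
--         m += 1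
--     for i in range(m, 0, -1):
--         left = n // (i + 1) + 1
--         right = n // i
--         if left <= right and res and res[-1][1] < left:
--             res.append((left, right, n // left))
--     return res
-- ===== SOURCE B (Python) =====
-- from typing import List, Tuple
--
-- def floorRange(n: int) -> List[Tuple[int, int, int]]:
--     if n <= 0:
--         return []
--     res = []
--     i = 1
--     while i <= n:
--         div = n // i
--         right = n // div
--         res.append((i, right, div))
--         i = right + 1
--     return res
-- ===== Notes on version B (the rewrite author's own statement) =====
-- stated objective: simpler
-- what changed: Replaced A's two-phase sqrt split (enumerate singleton blocks for m*m<=n, then reconstruct large blocks from a separate descending loop with an overlap guard) by one forward jumping loop that computes each block's right endpoint directly as n//(n//i) and jumps to right+1.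
import Mathlib
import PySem

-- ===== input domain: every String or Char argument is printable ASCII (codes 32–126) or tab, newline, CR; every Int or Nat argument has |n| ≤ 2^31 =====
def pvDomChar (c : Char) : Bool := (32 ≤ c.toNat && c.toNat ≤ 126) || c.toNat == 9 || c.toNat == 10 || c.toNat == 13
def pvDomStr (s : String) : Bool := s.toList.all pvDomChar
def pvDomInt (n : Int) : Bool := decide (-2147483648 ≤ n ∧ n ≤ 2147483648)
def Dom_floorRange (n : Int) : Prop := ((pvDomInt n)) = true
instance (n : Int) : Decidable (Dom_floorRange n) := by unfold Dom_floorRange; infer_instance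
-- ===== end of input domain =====

-- B replaces A's two-phase sqrt split by a single forward jumping loop (right endpoint n//(n//i)); objective: simpler. Same return value.

-- ===== PORT A =====
-- first while loop of A: appends the singleton blocks (m,m,n//m) while m*m <= n, returns (res, final m)
def floorRangeLoop1 (n : Int) (m : Int) (res : List (Int × Int × Int)) : List (Int × Int × Int) × Int :=
  if m * m ≤ n then
    floorRangeLoop1 n (m + 1) (res ++ [(m, m, PySem.Int.floordiv n m)])
  else (res, m)
termination_by (n + 1 - m).toNat
decreasing_by
  rename_i h
  have hm : m ≤ n := by
    rcases le_or_gt m 0 with h0 | h0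
    · nlinarith [mul_self_nonneg m]
    · nlinarith
  omega

-- body of A's second (descending for) loop; the match is Python's short-circuit 'res and res[-1][1] < left'
def floorRangeStep (n : Int) (res : List (Int × Int × Int)) (i : Int) : List (Int × Int × Int) :=
  let left := PySem.Int.floordiv n (i + 1) + 1
  let right := PySem.Int.floordiv n i
  if (decide (left ≤ right) &&
      (match res.getLast? with
       | some t => decide (t.2.1 < left)
       | none => false)) then
    res ++ [(left, right, PySem.Int.floordiv n left)]
  else res

def floorRange (n : Int) : List (Int × Int × Int) :=
  if n ≤ 0 then []
  else
    let p := floorRangeLoop1 n 1 []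
    (PySem.List.pyRange p.2 0 (-1)).foldl (floorRangeStep n) p.1

-- ===== PORT B =====
-- B's while loop; the fuel only makes it total (n.toNat steps always suffice since i strictly increases)
def floorRangeAltLoop (n : Int) : Nat → Int → List (Int × Int × Int)
  | 0, _ => []
  | fuel + 1, i =>
    if i ≤ n then
      let d := PySem.Int.floordiv n i
      let r := PySem.Int.floordiv n d
      (i, r, d) :: floorRangeAltLoop n fuel (r + 1)
    else []

def floorRange_alt (n : Int) : List (Int × Int × Int) :=
  if n ≤ 0 then [] else floorRangeAltLoop n n.toNat 1

-- ===== PRECONDITION & SPEC =====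
def Spec_floorRange (n : Int) (out : List (Int × Int × Int)) : Prop := out = floorRange_alt n
instance (n : Int) (out : List (Int × Int × Int)) : Decidable (Spec_floorRange n out) := by unfold Spec_floorRange; infer_instance

-- ===== CLAIM (what is proved, stated in full; the proofs are below) =====
def Claim_equal_floorRange : Prop := ∀ (n : Int), Dom_floorRange n → Spec_floorRange n (floorRange n)

-- ===== LEMMAS AND PROOFS =====

lemma fd_nonneg {n x : Int} (hn : 0 ≤ n) (hx : 0 < x) : 0 ≤ PySem.Int.floordiv n x :=
  (PySem.Int.le_floordiv_iff_mul_le (a := n) (q := 0) hx).2 (by simpa using hn)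

lemma fd_le_iff {n x c : Int} (hx : 0 < x) : PySem.Int.floordiv n x ≤ c ↔ n < (c + 1) * x := by
  have h := PySem.Int.floordiv_lt_iff_lt_mul (a := n) (b := x) (q := c + 1) hx
  rw [← h]; omega

lemma fd_le_self {n i : Int} (hn : 0 ≤ n) (hi : 1 ≤ i) : PySem.Int.floordiv n i ≤ n := by
  rw [fd_le_iff (by omega)]; nlinarith

lemma fd_one {n : Int} : PySem.Int.floordiv n 1 = n := by
  rw [PySem.Int.floordiv_eq_iff_of_pos (by omega)]; omega

lemma fd_antitone {n i : Int} (hn : 0 ≤ n) (hi : 1 ≤ i) :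
    PySem.Int.floordiv n (i + 1) ≤ PySem.Int.floordiv n i := by
  rw [fd_le_iff (by omega)]
  have h := (fd_le_iff (n := n) (c := PySem.Int.floordiv n i) (x := i) (by omega)).1 le_rfl
  have h0 : 0 ≤ PySem.Int.floordiv n i := fd_nonneg hn (by omega)
  nlinarith

-- a block starting at m with m*m ≤ n is a singleton: n//(n//m) = m
lemma fd_sing {n m : Int} (hn : 0 ≤ n) (hm : 1 ≤ m) (h : m * m ≤ n) :
    PySem.Int.floordiv n (PySem.Int.floordiv n m) = m := by
  set d := PySem.Int.floordiv n m with hd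
  have hmd : m ≤ d := (PySem.Int.le_floordiv_iff_mul_le (by omega)).2 h
  have hd0 : 0 < d := by omega
  have hdm : d * m ≤ n ∧ n < (d + 1) * m :=
    (PySem.Int.floordiv_eq_iff_of_pos (by omega)).1 hd.symm
  have h1 : m ≤ PySem.Int.floordiv n d :=
    (PySem.Int.le_floordiv_iff_mul_le hd0).2 (by nlinarith [hdm.1])
  have h2 : PySem.Int.floordiv n d ≤ m := by
    rw [fd_le_iff hd0]; nlinarith [hdm.2]
  omega

-- the divisor of a nonempty block: n // (n//(i+1)+1) = i
lemma fd_left {n i : Int} (hn : 0 ≤ n) (hi : 1 ≤ i)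
    (hlr : PySem.Int.floordiv n (i + 1) + 1 ≤ PySem.Int.floordiv n i) :
    PySem.Int.floordiv n (PySem.Int.floordiv n (i + 1) + 1) = i := by
  set l := PySem.Int.floordiv n (i + 1) + 1 with hl
  have hl0 : 0 < l := by have := fd_nonneg hn (show (0:Int) < i + 1 by omega); omega
  have ge : i ≤ PySem.Int.floordiv n l := by
    rw [PySem.Int.le_floordiv_iff_mul_le hl0]
    have := (PySem.Int.le_floordiv_iff_mul_le (a := n) (q := l) (b := i) (by omega)).1 hlr
    nlinarith
  have le : PySem.Int.floordiv n l ≤ i := by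
    rw [fd_le_iff hl0]
    have h1 : PySem.Int.floordiv n (i + 1) ≤ l - 1 := by omega
    have := (fd_le_iff (x := i + 1) (by omega)).1 h1
    nlinarith
  omega

lemma altLoop_gt {n : Int} (f : Nat) (l : Int) (h : ¬ l ≤ n) : floorRangeAltLoop n f l = [] := by
  cases f <;> simp [floorRangeAltLoop, h]

lemma altLoop_sing {n m : Int} (hn : 0 ≤ n) (hm : 1 ≤ m) (h : m * m ≤ n) (f : Nat) :
    floorRangeAltLoop n (f + 1) m
      = (m, m, PySem.Int.floordiv n m) :: floorRangeAltLoop n f (m + 1) := by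
  have hmn : m ≤ n := by nlinarith
  simp only [floorRangeAltLoop, if_pos hmn, fd_sing hn hm h]

lemma pyRange_desc_nil : PySem.List.pyRange 0 0 (-1) = [] := by decide

lemma pyRange_desc_cons {i : Int} (hi : 0 < i) :
    PySem.List.pyRange i 0 (-1) = i :: PySem.List.pyRange (i - 1) 0 (-1) := by
  unfold PySem.List.pyRange
  have h1 : ¬ ((-1 : Int) = 0) := by omega
  have h2 : ¬ ((0 : Int) < -1) := by omega
  simp only [if_neg h1, if_neg h2]
  rw [if_pos hi]
  have hc : (i - 0 + -(-1) - 1) / -(-1) = i := by norm_num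
  rw [hc]
  by_cases h3 : (0 : Int) < i - 1
  · rw [if_pos h3]
    have hc2 : (i - 1 - 0 + -(-1) - 1) / -(-1) = i - 1 := by norm_num
    rw [hc2]
    have ht : i.toNat = (i - 1).toNat + 1 := by omega
    rw [ht, List.range_succ_eq_map]
    simp only [List.map_cons, List.map_map, Nat.cast_zero, mul_zero, add_zero]
    congr 1
    apply List.map_congr_left
    intro k _
    simp only [Function.comp_apply]
    push_cast
    ring
  · rw [if_neg h3]
    have hi1 : i = 1 := by omega
    subst hi1
    simp

-- Phase 2 simulation: A's descending for-loop, run from i = k down to 1 on a state whose last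
-- block's right end is max s (n//(k+1)), appends exactly B's jump blocks from that point on.
lemma phase2 {n s : Int} (hn : 1 ≤ n) (hs1 : 1 ≤ s) (hs2 : s * s ≤ n) (hs3 : n < (s + 1) * (s + 1)) :
    ∀ (k : Nat) (pre : List (Int × Int × Int)) (t : Int × Int × Int) (f : Nat),
      pre.getLast? = some t →
      t.2.1 = max s (PySem.Int.floordiv n ((k : Int) + 1)) →
      (n - t.2.1).toNat ≤ f →
      (PySem.List.pyRange (k : Int) 0 (-1)).foldl (floorRangeStep n) pre
        = pre ++ floorRangeAltLoop n f (t.2.1 + 1) := by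
  intro k
  induction k with
  | zero =>
    intro pre t f hlast ht hf
    have hsn : s ≤ n := by nlinarith
    have h1 : PySem.Int.floordiv n ((0 : Nat) + 1 : Int) = n := by
      norm_num [fd_one]
    rw [h1] at ht
    have htn : t.2.1 = n := by omega
    rw [show ((0 : Nat) : Int) = 0 by norm_num, pyRange_desc_nil]
    rw [altLoop_gt _ _ (by omega)]
    simp
  | succ k ih =>
    intro pre t f hlast ht hf
    set i : Int := ((k + 1 : Nat) : Int) with hidef
    have hi1 : (1 : Int) ≤ i := by rw [hidef]; exact_mod_cast Nat.succ_le_succ (Nat.zero_le k)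
    have hik : i - 1 = (k : Int) := by push_cast [hidef]; ring
    rw [pyRange_desc_cons (by omega), hik, List.foldl_cons]
    set left := PySem.Int.floordiv n (i + 1) + 1 with hleft
    set right := PySem.Int.floordiv n i with hright
    have hstep : floorRangeStep n pre i =
        if left ≤ right ∧ t.2.1 < left then
          pre ++ [(left, right, PySem.Int.floordiv n left)]
        else pre := by
      by_cases ha : left ≤ right <;> by_cases hb : t.2.1 < left <;>
        simp [floorRangeStep, hlast, ← hleft, ← hright, ha, hb]
    have hmaxl := le_max_left s (PySem.Int.floordiv n (i + 1))
    have hmaxr := le_max_right s (PySem.Int.floordiv n (i + 1))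
    by_cases hg : left ≤ right ∧ t.2.1 < left
    · -- block appended; it is exactly B's next jump block
      rw [hstep, if_pos hg]
      have hL : t.2.1 = PySem.Int.floordiv n (i + 1) := by omega
      have hdiv : PySem.Int.floordiv n left = i := fd_left (by omega) hi1 hg.1
      have hrn : right ≤ n := fd_le_self (by omega) (by omega)
      obtain ⟨f', rfl⟩ : ∃ f', f = f' + 1 := ⟨f - 1, by omega⟩
      have hstart : t.2.1 + 1 = left := by omega
      rw [hstart]
      have hln : left ≤ n := le_trans hg.1 hrn
      simp only [floorRangeAltLoop, if_pos hln, hdiv, ← hright]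
      have hnew := ih (pre ++ [(left, right, PySem.Int.floordiv n left)])
        (left, right, PySem.Int.floordiv n left) f'
        (by simp) ?_ ?_
      · rw [hdiv] at hnew
        rw [hnew]
        simp [List.append_assoc]
      · -- new last right end = max s (n // (k+1)) = right, since right > s
        have hsr : s ≤ right := by omega
        show right = max s (PySem.Int.floordiv n ((k : Int) + 1))
        have hki : (k : Int) + 1 = i := by rw [hidef]; push_cast; ring
        rw [hki, ← hright]
        omega
      · show (n - right).toNat ≤ f'
        omega
    · -- nothing appended: the running maximum is unchanged
      rw [hstep, if_neg hg]
      have hkey : max s (PySem.Int.floordiv n (i + 1)) = max s (PySem.Int.floordiv n i) := by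
        rcases not_and_or.1 hg with ha | hb
        · -- empty block: n//(i+1) = n//i
          have h1 : PySem.Int.floordiv n i ≤ PySem.Int.floordiv n (i + 1) := by omega
          have h2 := fd_antitone (n := n) (i := i) (by omega) hi1
          omega
        · -- block ends at or below s: n//i ≤ s
          push_neg at hb
          have hsl : left ≤ s := by omega
          have hfi : PySem.Int.floordiv n i ≤ s := by
            by_contra hc
            push_neg at hc
            have h1 : (s + 1) * i ≤ n :=
              (PySem.Int.le_floordiv_iff_mul_le (by omega)).1 (by omega)
            have h2 : n < s * (i + 1) := by
              have := (fd_le_iff (n := n) (x := i + 1) (c := s - 1) (by omega)).1 (by omega)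
              nlinarith
            have his : i + 1 ≤ s := by nlinarith
            nlinarith
          have h2 := fd_antitone (n := n) (i := i) (by omega) hi1
          omega
      have hki : i = (k : Int) + 1 := by rw [hidef]; push_cast; ring
      exact ih pre t f hlast (by rw [ht, hkey, hki]) hf

-- exit of A's first loop: m = s+1, then phase2 takes over
lemma phase_exit {n s : Int} (hn : 1 ≤ n) (hs1 : 1 ≤ s) (hs2 : s * s ≤ n)
    (hs3 : n < (s + 1) * (s + 1)) (m : Int) (res : List (Int × Int × Int))
    (t : Int × Int × Int) (fuel : Nat)
    (hm2 : 2 ≤ m) (hms : m ≤ s + 1) (hmm : ¬ m * m ≤ n)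
    (hlast : res.getLast? = some t) (ht : t.2.1 = m - 1)
    (hf : (n + 1 - m).toNat ≤ fuel) :
    (PySem.List.pyRange m 0 (-1)).foldl (floorRangeStep n) res
      = res ++ floorRangeAltLoop n fuel m := by
  have hmeq : m = s + 1 := by
    rcases lt_or_ge m (s + 1) with h | h
    · exfalso
      have : m * m ≤ s * s := by nlinarith
      omega
    · omega
  have hfd : PySem.Int.floordiv n (m + 1) ≤ s := by
    rw [fd_le_iff (by omega)]
    nlinarith
  have hcast : ((m.toNat : Nat) : Int) = m := by omega
  have hfd2 : PySem.Int.floordiv n (s + 1 + 1) ≤ s := by rw [← hmeq]; exact hfd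
  have := phase2 hn hs1 hs2 hs3 m.toNat res t fuel hlast
    (by rw [hcast, ht, hmeq, max_eq_left hfd2]; omega) (by omega)
  rw [hcast] at this
  rw [this, ht, hmeq]
  norm_num

-- Phase 1 simulation: A's first loop produces B's singleton blocks one-for-one, then phase 2
lemma phase1 {n s : Int} (hn : 1 ≤ n) (hs1 : 1 ≤ s) (hs2 : s * s ≤ n)
    (hs3 : n < (s + 1) * (s + 1)) :
    ∀ (fuel : Nat) (m : Int) (res : List (Int × Int × Int)) (t : Int × Int × Int),
      2 ≤ m → m ≤ s + 1 →
      res.getLast? = some t → t.2.1 = m - 1 →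
      (n + 1 - m).toNat ≤ fuel →
      (PySem.List.pyRange (floorRangeLoop1 n m res).2 0 (-1)).foldl (floorRangeStep n)
          (floorRangeLoop1 n m res).1
        = res ++ floorRangeAltLoop n fuel m := by
  intro fuel
  induction fuel with
  | zero =>
    intro m res t hm2 hms hlast ht hf
    have hmn : n + 1 ≤ m := by omega
    have hmm : ¬ m * m ≤ n := by nlinarith
    rw [floorRangeLoop1, if_neg hmm]
    exact phase_exit hn hs1 hs2 hs3 m res t 0 hm2 hms hmm hlast ht hf
  | succ fuel ih =>
    intro m res t hm2 hms hlast ht hf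
    by_cases hmm : m * m ≤ n
    · rw [floorRangeLoop1, if_pos hmm]
      have hmls : m ≤ s := by
        by_contra hc
        push_neg at hc
        have : (s + 1) * (s + 1) ≤ m * m := by nlinarith
        omega
      have hmn : m ≤ n := by nlinarith
      rw [altLoop_sing (by omega) (by omega) hmm fuel]
      have := ih (m + 1) (res ++ [(m, m, PySem.Int.floordiv n m)])
        (m, m, PySem.Int.floordiv n m) (by omega) (by omega) (by simp) (by norm_num) (by omega)
      rw [this]
      simp [List.append_assoc]
    · rw [floorRangeLoop1, if_neg hmm]
      exact phase_exit hn hs1 hs2 hs3 m res t (fuel + 1) hm2 hms hmm hlast ht hf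

-- ===== VERDICT (by name: the statement is the Claim_ definition above) =====
theorem floorRange_spec : Claim_equal_floorRange := by
  unfold Claim_equal_floorRange Spec_floorRange
  intro n _
  by_cases hn : n ≤ 0
  · simp [floorRange, floorRange_alt, hn]
  · push_neg at hn
    have hn1 : (1 : Int) ≤ n := hn
    set s : Int := (Nat.sqrt n.toNat : Int) with hsdef
    have hs0 : (0 : Int) ≤ s := by rw [hsdef]; exact_mod_cast Nat.zero_le _
    have hntn : ((n.toNat : Nat) : Int) = n := by omega
    have hs2 : s * s ≤ n := by
      have h := Nat.sqrt_le' n.toNat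
      have h2 : ((n.toNat.sqrt ^ 2 : Nat) : Int) ≤ ((n.toNat : Nat) : Int) :=
        Int.ofNat_le.mpr h
      push_cast at h2
      rw [← hsdef, pow_two] at h2
      omega
    have hs3 : n < (s + 1) * (s + 1) := by
      have h := Nat.lt_succ_sqrt' n.toNat
      have h2 : ((n.toNat : Nat) : Int) < ((n.toNat.sqrt.succ ^ 2 : Nat) : Int) :=
        Int.ofNat_lt.mpr h
      push_cast [Nat.succ_eq_add_one] at h2
      rw [← hsdef, pow_two] at h2
      omega
    have hs1 : (1 : Int) ≤ s := by
      rcases eq_or_lt_of_le hs0 with h | h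
      · exfalso; rw [← h] at hs3; norm_num at hs3; omega
      · omega
    simp only [floorRange, floorRange_alt, if_neg (show ¬ n ≤ 0 by omega)]
    rw [floorRangeLoop1, if_pos (show (1 : Int) * 1 ≤ n by omega)]
    obtain ⟨g, hg⟩ : ∃ g, n.toNat = g + 1 := ⟨n.toNat - 1, by omega⟩
    rw [hg, altLoop_sing (by omega) le_rfl (by omega) g]
    have hmain := phase1 hn1 hs1 hs2 hs3 g 2 ([] ++ [(1, 1, PySem.Int.floordiv n 1)])
      (1, 1, PySem.Int.floordiv n 1) (by norm_num) (by omega) (by simp) (by norm_num) (by omega)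
    norm_num at hmain ⊢
    exact hmain
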